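-- pv_equiv track=rewrite | github.com/ookok/LivingTreeAlAgent | localresources/LivingTreeAlAgent/client/src/business/virtual_avatar_social/__init__.py | _get_base_body_by_level
-- ===== SOURCE A (Python) =====
-- from typing import Dict, List, Optional, Any, Tuple, Set
--
-- def _get_base_body_by_level(level: int) -> Dict:
--     """根据等级获取基础身体"""
--     appearances = {
--         1: {"type": "humanoid", "skin_tone": "#F5DEB3", "body_shape": "standard"},
--         10: {"type": "humanoid", "skin_tone": "#F5DEB3", "body_shape": "athletic"},
--         30: {"type": "humanoid", "skin_tone": "#DEB887", "body_shape": "muscular"},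
--         50: {"type": "humanoid", "skin_tone": "#D2691E", "body_shape": "noble"}
--     }
--
--     for lvl in sorted(appearances.keys(), reverse=True):
--         if level >= lvl:
--             return appearances[lvl]
--     return appearances[1]
-- ===== SOURCE B (Python) =====
-- _TIERS = (
--     ("#F5DEB3", "standard"),
--     ("#F5DEB3", "athletic"),
--     ("#DEB887", "muscular"),
--     ("#D2691E", "noble"),
-- )
--
-- def _get_base_body_by_level(level: int):
--     """根据等级获取基础身体"""
--     # branch-free: the tier index is the number of thresholds reached
--     i = (level >= 10) + (level >= 30) + (level >= 50)
--     skin_tone, body_shape = _TIERS[i]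
--     return {"type": "humanoid", "skin_tone": skin_tone, "body_shape": body_shape}
-- ===== Notes on version B (the rewrite author's own statement) =====
-- stated objective: alternative
-- what changed: Replaced the dict-plus-sorted-descending-scan (and any conditional control flow) with a branch-free arithmetic tier index (sum of boolean threshold comparisons) indexing a constant per-tier data table from which the result dict is built.
import Mathlib
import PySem

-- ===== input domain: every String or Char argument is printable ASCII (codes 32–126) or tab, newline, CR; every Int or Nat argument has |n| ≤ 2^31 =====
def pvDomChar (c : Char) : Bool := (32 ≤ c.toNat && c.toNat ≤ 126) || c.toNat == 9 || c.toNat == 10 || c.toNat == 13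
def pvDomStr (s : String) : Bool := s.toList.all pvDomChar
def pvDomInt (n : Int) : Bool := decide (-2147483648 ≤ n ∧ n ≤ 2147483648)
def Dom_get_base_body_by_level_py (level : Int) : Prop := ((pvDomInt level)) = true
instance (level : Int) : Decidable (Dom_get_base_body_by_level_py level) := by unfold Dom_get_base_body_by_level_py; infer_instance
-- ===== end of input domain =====

-- B replaces A's dict plus sorted-descending scan with a branch-free arithmetic tier index into a constant data table (objective: alternative).

-- ===== PORT A =====
-- the appearances dict of A, as an association list in insertion order
def pvAppearances : PySem.Dict Int (List (String × String)) :=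
  PySem.Dict.ofList [(1, [("type", "humanoid"), ("skin_tone", "#F5DEB3"), ("body_shape", "standard")]),
   (10, [("type", "humanoid"), ("skin_tone", "#F5DEB3"), ("body_shape", "athletic")]),
   (30, [("type", "humanoid"), ("skin_tone", "#DEB887"), ("body_shape", "muscular")]),
   (50, [("type", "humanoid"), ("skin_tone", "#D2691E"), ("body_shape", "noble")])]

-- the for-loop with early return over sorted(keys, reverse=True)
def pvLoopA (level : Int) : List Int → Option (List (String × String))
  | [] => none
  | lvl :: rest => if level ≥ lvl then PySem.Dict.get? pvAppearances lvl else pvLoopA level rest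

def get_base_body_by_level_py (level : Int) : List (String × String) :=
  match pvLoopA level (PySem.List.sorted (PySem.Dict.keys pvAppearances) id (reverse := true)) with
  | some d => d
  | none => PySem.Dict.getD pvAppearances 1 []

-- ===== PORT B =====
-- the constant per-tier table _TIERS of Source B
def pvTiers : List (String × String) :=
  [("#F5DEB3", "standard"), ("#F5DEB3", "athletic"), ("#DEB887", "muscular"), ("#D2691E", "noble")]

def get_base_body_by_level_py_alt (level : Int) : List (String × String) :=
  -- i = (level >= 10) + (level >= 30) + (level >= 50), always 0..3 so the index is in range
  let i : Nat := (if level ≥ 10 then 1 else 0) + (if level ≥ 30 then 1 else 0) + (if level ≥ 50 then 1 else 0)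
  let t := pvTiers.getD i ("", "")
  [("type", "humanoid"), ("skin_tone", t.1), ("body_shape", t.2)]

-- ===== PRECONDITION & SPEC =====
def Spec_get_base_body_by_level_py (level : Int) (out : List (String × String)) : Prop := out = get_base_body_by_level_py_alt level
instance (level : Int) (out : List (String × String)) : Decidable (Spec_get_base_body_by_level_py level out) := by unfold Spec_get_base_body_by_level_py; infer_instance

-- ===== CLAIM (what is proved, stated in full; the proofs are below) =====
def Claim_equal_get_base_body_by_level_py : Prop := ∀ (level : Int), Dom_get_base_body_by_level_py level → Spec_get_base_body_by_level_py level (get_base_body_by_level_py level)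

-- ===== LEMMAS AND PROOFS =====

-- ===== VERDICT (by name: the statement is the Claim_ definition above) =====
theorem get_base_body_by_level_py_spec : Claim_equal_get_base_body_by_level_py := by
  intro level _
  unfold Spec_get_base_body_by_level_py get_base_body_by_level_py get_base_body_by_level_py_alt
  have hk : PySem.List.sorted (PySem.Dict.keys pvAppearances) id (reverse := true) = ([50, 30, 10, 1] : List Int) := by decide
  rw [hk]
  by_cases h50 : level ≥ 50
  · simp [pvLoopA, h50, show level ≥ 30 by omega, show level ≥ 10 by omega, PySem.Dict.get?, pvAppearances, pvTiers]
    decide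
  · by_cases h30 : level ≥ 30
    · simp [pvLoopA, h50, h30, show level ≥ 10 by omega, PySem.Dict.get?, pvAppearances, pvTiers]
      decide
    · by_cases h10 : level ≥ 10
      · simp [pvLoopA, h50, h30, h10, PySem.Dict.get?, pvAppearances, pvTiers]
        decide
      · by_cases h1 : level ≥ 1
        · simp [pvLoopA, h50, h30, h10, h1, PySem.Dict.get?, pvAppearances, pvTiers]
          decide
        · simp [pvLoopA, h50, h30, h10, h1, PySem.Dict.getD, PySem.Dict.get?, pvAppearances, pvTiers]
          decide
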